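-- pv_equiv track=rewrite | github.com/menudoproblema/cosecha | packages/cosecha-engine-gherkin/src/cosecha/engine/gherkin/step_catalog.py | _tokenize_step_text
-- ===== SOURCE A (Python) =====
-- _MIN_QUERY_TOKEN_LENGTH = 3
--
-- def _tokenize_step_text(step_text: str) -> tuple[str, ...]:
--     normalized_tokens = [
--         token
--         for token in ''.join(
--             character.lower() if character.isalnum() else ' '
--             for character in step_text
--         ).split()
--         if len(token) >= _MIN_QUERY_TOKEN_LENGTH
--     ]
--     return tuple(dict.fromkeys(normalized_tokens))
-- ===== SOURCE B (Python) =====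
-- def _tokenize_step_text(step_text: str) -> tuple[str, ...]:
--     result = []
--     buffer = []
--
--     def flush():
--         token = ''.join(buffer)
--         if len(token) >= 3 and token not in result:
--             result.append(token)
--         buffer.clear()
--
--     for character in step_text:
--         if character.isalnum():
--             buffer.append(character.lower())
--         else:
--             flush()
--     flush()
--     return tuple(result)
-- ===== Notes on version B (the rewrite author's own statement) =====
-- stated objective: alternative
-- what changed: Replaces the normalize-join-split-filter-dedup pipeline (intermediate joined string, .split(), dict.fromkeys) with a single streaming pass over the characters that maintains a token buffer and appends each long unseen token on the fly.
import Mathlib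
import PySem

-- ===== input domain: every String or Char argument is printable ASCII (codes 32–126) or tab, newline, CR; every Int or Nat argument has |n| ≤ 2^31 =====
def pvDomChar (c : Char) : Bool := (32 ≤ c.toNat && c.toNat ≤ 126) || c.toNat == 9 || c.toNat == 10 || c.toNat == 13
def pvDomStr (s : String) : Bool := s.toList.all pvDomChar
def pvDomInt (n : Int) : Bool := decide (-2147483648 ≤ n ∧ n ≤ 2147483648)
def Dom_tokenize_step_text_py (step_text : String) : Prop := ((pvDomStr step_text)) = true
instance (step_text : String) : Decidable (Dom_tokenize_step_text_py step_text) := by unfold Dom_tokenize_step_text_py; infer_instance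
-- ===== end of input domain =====

-- B fuses A's normalize/join/split/filter/dedup pipeline into one streaming pass with a
-- token buffer (objective: alternative decomposition; same return value, no side effects).

-- ===== PORT A =====
-- ''.join(c.lower() if c.isalnum() else ' ' for c in step_text): joining single-character
-- strings is exactly mapping the character transformation over the character list.
def tokenize_step_text_py (step_text : String) : List String :=
  let normalized : List Char :=
    step_text.toList.map (fun c => if PySem.Chars.isalnum c then PySem.Chars.lowerChar c else ' ')
  let normalized_tokens : List (List Char) :=
    (PySem.Chars.split₀ normalized).filter (fun t => decide (3 ≤ t.length))
  (PySem.List.dedup normalized_tokens).map (fun t => String.ofList t)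

-- ===== PORT B =====
-- state = (result so far, current token buffer); flush = Source B's `flush()`.
def pvAltFlush (st : List (List Char) × List Char) : List (List Char) × List Char :=
  if decide (3 ≤ st.2.length) && !(st.1.contains st.2) then (st.1 ++ [st.2], []) else (st.1, [])

def pvAltStep (st : List (List Char) × List Char) (c : Char) : List (List Char) × List Char :=
  if PySem.Chars.isalnum c then (st.1, st.2 ++ [PySem.Chars.lowerChar c]) else pvAltFlush st

def tokenize_step_text_py_alt (step_text : String) : List String :=
  (pvAltFlush (step_text.toList.foldl pvAltStep ([], []))).1.map (fun t => String.ofList t)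

-- ===== PRECONDITION & SPEC =====
def Spec_tokenize_step_text_py (step_text : String) (out : List String) : Prop := out = tokenize_step_text_py_alt step_text
instance (step_text : String) (out : List String) : Decidable (Spec_tokenize_step_text_py step_text out) := by unfold Spec_tokenize_step_text_py; infer_instance

-- ===== CLAIM (what is proved, stated in full; the proofs are below) =====
def Claim_equal_tokenize_step_text_py : Prop := ∀ (step_text : String), Dom_tokenize_step_text_py step_text → Spec_tokenize_step_text_py step_text (tokenize_step_text_py step_text)

-- ===== LEMMAS AND PROOFS =====

-- the character A writes in place of each input character
def pvNorm (c : Char) : Char := if PySem.Chars.isalnum c then PySem.Chars.lowerChar c else ' '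

-- lowering an alphanumeric character never yields a whitespace character
theorem pv_isspace_lower_of_isalnum (c : Char) (h : PySem.Chars.isalnum c = true) :
    PySem.Chars.isspace (PySem.Chars.lowerChar c) = false := by
  simp only [PySem.Chars.isalnum, PySem.Chars.isalpha, PySem.Chars.isupper, PySem.Chars.islower,
        PySem.Chars.isdigit, Char.le_def, UInt32.le_iff_toNat_le, Char.toNat_val,
        Bool.or_eq_true, Bool.and_eq_true, decide_eq_true_eq] at h
  rcases h with (h | h) | h
  · have h1 : 65 ≤ c.toNat := h.1
    have h2 : c.toNat ≤ 90 := h.2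
    have hu : PySem.Chars.isupper c = true := by
      simp only [PySem.Chars.isupper, Char.le_def, UInt32.le_iff_toNat_le, Char.toNat_val,
        Bool.and_eq_true, decide_eq_true_eq]
      exact h
    have hval : (c.toNat + 32).isValidChar := Or.inl (by omega)
    have hv : (Char.ofNat (c.toNat + 32)).toNat = c.toNat + 32 := by
      simp [Char.toNat_ofNat, hval]
    simp only [PySem.Chars.lowerChar, hu, if_true, PySem.Chars.isspace, hv]
    simp only [Bool.or_eq_false_iff, Bool.and_eq_false_iff, decide_eq_false_iff_not]
    omega
  · have h1 : 97 ≤ c.toNat := h.1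
    have h2 : c.toNat ≤ 122 := h.2
    have hu : PySem.Chars.isupper c = false := by
      simp only [PySem.Chars.isupper, Char.le_def, UInt32.le_iff_toNat_le, Char.toNat_val,
        Bool.and_eq_false_iff, decide_eq_false_iff_not]
      right
      intro hz
      have hz' : c.toNat ≤ 90 := hz
      omega
    simp only [PySem.Chars.lowerChar, hu, Bool.false_eq_true, if_false, PySem.Chars.isspace]
    simp only [Bool.or_eq_false_iff, Bool.and_eq_false_iff, decide_eq_false_iff_not]
    omega
  · have h1 : 48 ≤ c.toNat := h.1
    have h2 : c.toNat ≤ 57 := h.2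
    have hu : PySem.Chars.isupper c = false := by
      simp only [PySem.Chars.isupper, Char.le_def, UInt32.le_iff_toNat_le, Char.toNat_val,
        Bool.and_eq_false_iff, decide_eq_false_iff_not]
      left
      intro ha
      have ha' : 65 ≤ c.toNat := ha
      omega
    simp only [PySem.Chars.lowerChar, hu, Bool.false_eq_true, if_false, PySem.Chars.isspace]
    simp only [Bool.or_eq_false_iff, Bool.and_eq_false_iff, decide_eq_false_iff_not]
    omega

-- split₀.go's accumulator is a prefix of the answer
theorem pv_split_go_acc (l : List Char) (cur : List Char) (acc : List (List Char)) :
    PySem.Chars.split₀.go l cur acc = acc.reverse ++ PySem.Chars.split₀.go l cur [] := by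
  induction l generalizing cur acc with
  | nil =>
    by_cases hc : cur.isEmpty <;> simp [PySem.Chars.split₀.go, hc]
  | cons c rest ih =>
    by_cases hs : PySem.Chars.isspace c
    · by_cases hc : cur.isEmpty
      · simp only [PySem.Chars.split₀.go, hs, hc, if_true]
        exact ih [] acc
      · simp only [PySem.Chars.split₀.go, hs, hc, if_true, if_false, Bool.false_eq_true]
        rw [ih [] (cur.reverse :: acc), ih [] [cur.reverse]]
        simp
    · simp only [PySem.Chars.split₀.go, hs, Bool.false_eq_true, if_false]
      exact ih (c :: cur) acc

-- main invariant: B's fold-then-flush, started from any (result, buffer) state, equals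
-- re-adding (PySem.Set.add) each long token of A's split of the remaining normalized text
theorem pv_main (cs : List Char) (res : List (List Char)) (buf : List Char) :
    (pvAltFlush (cs.foldl pvAltStep (res, buf))).1
      = ((PySem.Chars.split₀.go (cs.map pvNorm) buf.reverse []).filter
            (fun t => decide (3 ≤ t.length))).foldl PySem.Set.add res := by
  induction cs generalizing res buf with
  | nil =>
    by_cases hb : buf = []
    · subst hb
      simp [PySem.Chars.split₀.go, pvAltFlush]
    · have hne : buf.reverse.isEmpty = false := by simp [hb]
      simp only [List.map_nil, List.foldl_nil, PySem.Chars.split₀.go, hne, Bool.false_eq_true,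
        if_false, List.reverse_reverse, List.reverse_nil]
      by_cases hlen : 3 ≤ buf.length
      · by_cases hm : buf ∈ res <;> simp [pvAltFlush, hlen, PySem.Set.add, hm]
      · simp [pvAltFlush, hlen]
  | cons c rest ih =>
    by_cases ha : PySem.Chars.isalnum c
    · have hs := pv_isspace_lower_of_isalnum c ha
      simp only [List.foldl_cons, List.map_cons, pvAltStep, ha, if_true, pvNorm,
        PySem.Chars.split₀.go, hs, Bool.false_eq_true, if_false]
      rw [ih res (buf ++ [PySem.Chars.lowerChar c])]
      simp
    · have hn : pvNorm c = ' ' := by simp [pvNorm, ha]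
      have hs : PySem.Chars.isspace ' ' = true := by decide
      by_cases hb : buf = []
      · subst hb
        simp only [List.foldl_cons, List.map_cons, pvAltStep, ha, Bool.false_eq_true, if_false,
          hn, PySem.Chars.split₀.go, hs, if_true, List.reverse_nil, List.isEmpty_nil]
        rw [show pvAltFlush (res, []) = (res, []) by simp [pvAltFlush], ih res []]
        simp
      · have hne : buf.reverse.isEmpty = false := by simp [hb]
        simp only [List.foldl_cons, List.map_cons, pvAltStep, ha, Bool.false_eq_true, if_false,
          hn, PySem.Chars.split₀.go, hs, if_true, hne, List.reverse_reverse]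
        rw [pv_split_go_acc (rest.map pvNorm) [] [buf]]
        by_cases hlen : 3 ≤ buf.length
        · by_cases hm : buf ∈ res
          · rw [show pvAltFlush (res, buf) = (res, []) by simp [pvAltFlush, hlen, hm],
              ih res []]
            simp [hlen, PySem.Set.add, hm]
          · rw [show pvAltFlush (res, buf) = (res ++ [buf], []) by simp [pvAltFlush, hlen, hm],
              ih (res ++ [buf]) []]
            simp [hlen, PySem.Set.add, hm]
        · rw [show pvAltFlush (res, buf) = (res, []) by simp [pvAltFlush, hlen]]
          rw [ih res []]
          simp [hlen]

-- ===== VERDICT (by name: the statement is the Claim_ definition above) =====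
theorem tokenize_step_text_py_spec : Claim_equal_tokenize_step_text_py := by
  intro s _
  unfold Spec_tokenize_step_text_py tokenize_step_text_py tokenize_step_text_py_alt
  rw [pv_main s.toList [] []]
  rfl
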